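-- pv_equiv track=rewrite | github.com/suyoung049/TIL | 2024_취업준비/코테/20240813/선발고사.py | solution
-- ===== SOURCE A (Python) =====
-- def solution(rank, attendance):
--     answer = 0
--     length = len(rank)
--     true_list = []
--     for i in range(length):
--         if attendance[i] == True:
--             true_list.append(rank[i])
--     true_list.sort()
--     answer = 10000 * rank.index(true_list[0]) + 100 * rank.index(true_list[1]) + rank.index(true_list[2])
--
--     return answer
-- ===== SOURCE B (Python) =====
-- def solution(rank, attendance):
--     # single-pass selection of the three smallest attending ranks instead of sort
--     m1 = m2 = m3 = None
--     for i in range(len(rank)):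
--         if attendance[i] == True:
--             r = rank[i]
--             if m1 is None or r < m1:
--                 m1, m2, m3 = r, m1, m2
--             elif m2 is None or r < m2:
--                 m2, m3 = r, m2
--             elif m3 is None or r < m3:
--                 m3 = r
--     return 10000 * rank.index(m1) + 100 * rank.index(m2) + rank.index(m3)
-- ===== Notes on version B (the rewrite author's own statement) =====
-- stated objective: alternative
-- what changed: B replaces A's build-list-then-sort-then-take-first-three by a single pass that maintains the three smallest attending ranks (m1,m2,m3) in order, keeping the same rank.index encoding of the answer.
import Mathlib
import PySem

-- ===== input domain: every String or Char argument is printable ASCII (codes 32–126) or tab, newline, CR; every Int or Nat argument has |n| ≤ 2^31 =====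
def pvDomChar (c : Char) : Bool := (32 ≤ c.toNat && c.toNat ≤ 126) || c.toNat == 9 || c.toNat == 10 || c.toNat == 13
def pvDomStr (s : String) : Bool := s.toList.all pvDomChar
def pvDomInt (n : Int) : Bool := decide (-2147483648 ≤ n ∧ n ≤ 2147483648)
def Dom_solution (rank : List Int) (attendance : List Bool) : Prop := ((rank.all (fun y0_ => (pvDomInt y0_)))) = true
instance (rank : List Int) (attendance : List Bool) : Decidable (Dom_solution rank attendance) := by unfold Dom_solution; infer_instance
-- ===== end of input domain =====

-- B replaces sort-then-take-three by a single-pass selection of the three smallest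
-- attending ranks (objective: alternative); the rank.index encoding is kept as in A.

-- ===== PORT A =====
def solution (rank : List Int) (attendance : List Bool) : Int :=
  let length : Int := rank.length
  let true_list :=
    (PySem.List.pyRange 0 length 1).foldl
      (fun acc i =>
        if PySem.List.pyGetD attendance i false = true then
          acc ++ [PySem.List.pyGetD rank i 0]
        else acc) []
  let ts := PySem.List.sorted true_list id false
  -- true_list[0..2] and rank.index: in range / present under Pre_solution
  10000 * (((PySem.List.index? rank (PySem.List.pyGetD ts 0 0)).getD 0 : Nat) : Int)
    + 100 * (((PySem.List.index? rank (PySem.List.pyGetD ts 1 0)).getD 0 : Nat) : Int)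
    + (((PySem.List.index? rank (PySem.List.pyGetD ts 2 0)).getD 0 : Nat) : Int)

-- ===== PORT B =====
-- "m is None or r < m"
def pyLtOpt (r : Int) : Option Int → Bool
  | none => true
  | some v => decide (r < v)

-- one loop-body update of (m1, m2, m3)
def step3 (st : Option Int × Option Int × Option Int) (r : Int) :
    Option Int × Option Int × Option Int :=
  if pyLtOpt r st.1 then (some r, st.1, st.2.1)
  else if pyLtOpt r st.2.1 then (st.1, some r, st.2.1)
  else if pyLtOpt r st.2.2 then (st.1, st.2.1, some r)
  else st

def solution_alt (rank : List Int) (attendance : List Bool) : Int :=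
  let st :=
    (PySem.List.pyRange 0 (rank.length : Int) 1).foldl
      (fun st i =>
        if PySem.List.pyGetD attendance i false = true then
          step3 st (PySem.List.pyGetD rank i 0)
        else st)
      (none, none, none)
  -- rank.index(m): m is some _ and present under Pre_solution
  10000 * (((st.1.bind (fun v => PySem.List.index? rank v)).getD 0 : Nat) : Int)
    + 100 * (((st.2.1.bind (fun v => PySem.List.index? rank v)).getD 0 : Nat) : Int)
    + (((st.2.2.bind (fun v => PySem.List.index? rank v)).getD 0 : Nat) : Int)

-- ===== PRECONDITION & SPEC =====
-- A raises IndexError when attendance is shorter than rank, and IndexError on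
-- true_list[0..2] when fewer than three positions are attending; Pre_ excludes exactly those.
def Pre_solution (rank : List Int) (attendance : List Bool) : Prop :=
  rank.length ≤ attendance.length ∧ 3 ≤ (rank.zip attendance).countP (fun p => p.2)

instance (rank : List Int) (attendance : List Bool) : Decidable (Pre_solution rank attendance) := by
  unfold Pre_solution; infer_instance

def pvWitness_solution : List Int × List Bool := ([3, 1, 2], [true, true, true])

def Spec_solution (rank : List Int) (attendance : List Bool) (out : Int) : Prop :=
  out = solution_alt rank attendance
instance (rank : List Int) (attendance : List Bool) (out : Int) : Decidable (Spec_solution rank attendance out) := by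
  unfold Spec_solution; infer_instance

-- ===== CLAIM (what is proved, stated in full; the proofs are below) =====
def Claim_equal_solution : Prop := ∀ (rank : List Int) (attendance : List Bool),
  Dom_solution rank attendance → Pre_solution rank attendance →
  Spec_solution rank attendance (solution rank attendance)

-- ===== LEMMAS AND PROOFS =====

-- insertion into a list by the same comparison sequence B's loop performs
def ins (x : Int) : List Int → List Int
  | [] => [x]
  | h :: t => if x < h then x :: h :: t else h :: ins x t

-- the first three elements of a list, as B's option triple
def tri : List Int → Option Int × Option Int × Option Int
  | [] => (none, none, none)
  | [a] => (some a, none, none)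
  | [a, b] => (some a, some b, none)
  | a :: b :: c :: _ => (some a, some b, some c)

theorem step3_tri (s : List Int) (x : Int) : step3 (tri s) x = tri (ins x s) := by
  match s with
  | [] => simp [tri, ins, step3, pyLtOpt]
  | [a] =>
    by_cases h1 : x < a <;> simp [tri, ins, step3, pyLtOpt, h1]
  | [a, b] =>
    by_cases h1 : x < a <;> by_cases h2 : x < b <;>
      simp [tri, ins, step3, pyLtOpt, h1, h2]
  | a :: b :: c :: t =>
    by_cases h1 : x < a <;> by_cases h2 : x < b <;> by_cases h3 : x < c <;>
      simp [tri, ins, step3, pyLtOpt, h1, h2, h3]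

theorem foldl_step3_tri (l : List (Int × Bool)) (s : List Int) :
    l.foldl (fun st p => if p.2 = true then step3 st p.1 else st) (tri s)
      = tri (l.foldl (fun s p => if p.2 = true then ins p.1 s else s) s) := by
  induction l generalizing s with
  | nil => rfl
  | cons p l ih =>
    simp only [List.foldl_cons]
    by_cases hp : p.2 = true
    · rw [if_pos hp, if_pos hp, step3_tri]; exact ih _
    · rw [if_neg hp, if_neg hp]; exact ih s

theorem ins_perm (x : Int) (s : List Int) : (ins x s).Perm (x :: s) := by
  induction s with
  | nil => simp [ins]
  | cons h t ih =>
    by_cases hx : x < h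
    · simp [ins, hx]
    · simp only [ins, if_neg hx]
      exact (ih.cons h).trans (List.Perm.swap x h t)

theorem ins_sorted (x : Int) (s : List Int) (hs : s.Pairwise (· ≤ ·)) :
    (ins x s).Pairwise (· ≤ ·) := by
  induction s with
  | nil => simp [ins]
  | cons h t ih =>
    rw [List.pairwise_cons] at hs
    by_cases hx : x < h
    · simp only [ins, if_pos hx, List.pairwise_cons]
      refine ⟨?_, hs⟩
      intro b hb
      rw [List.mem_cons] at hb
      rcases hb with rfl | hb
      · omega
      · exact le_of_lt (lt_of_lt_of_le hx (hs.1 b hb))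
    · simp only [ins, if_neg hx, List.pairwise_cons]
      refine ⟨?_, ih hs.2⟩
      intro b hb
      have hmem := (ins_perm x t).mem_iff.mp hb
      rw [List.mem_cons] at hmem
      rcases hmem with rfl | hmem
      · omega
      · exact hs.1 b hmem

theorem insort_sorted (l : List Int) (s : List Int) (hs : s.Pairwise (· ≤ ·)) :
    (l.foldl (fun s x => ins x s) s).Pairwise (· ≤ ·) := by
  induction l generalizing s with
  | nil => exact hs
  | cons x l ih => exact ih _ (ins_sorted x s hs)

theorem insort_perm (l : List Int) (s : List Int) :
    (l.foldl (fun s x => ins x s) s).Perm (s ++ l) := by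
  induction l generalizing s with
  | nil => simp
  | cons x l ih =>
    simp only [List.foldl_cons]
    refine (ih (ins x s)).trans ?_
    refine (((ins_perm x s).append_right l)).trans ?_
    exact List.perm_middle.symm

theorem insort_eq_sorted (l : List Int) :
    l.foldl (fun s x => ins x s) [] = PySem.List.sorted l id false := by
  apply PySem.List.eq_of_perm_of_pairwise_le
  · exact ((insort_perm l []).trans (by simp)).trans (PySem.List.sorted_perm l id false).symm
  · exact insort_sorted l [] (by simp)
  · simpa using PySem.List.sorted_pairwise (xs := l) (key := id)

theorem zfold_ins (l : List (Int × Bool)) (s : List Int) :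
    l.foldl (fun s p => if p.2 = true then ins p.1 s else s) s
      = ((l.filter (fun p => p.2)).map (·.1)).foldl (fun s x => ins x s) s := by
  induction l generalizing s with
  | nil => rfl
  | cons p l ih =>
    by_cases hp : p.2 = true <;> simp [hp, ih]

theorem foldl_if_append (l : List (Int × Bool)) (acc : List Int) :
    l.foldl (fun acc p => if p.2 = true then acc ++ [p.1] else acc) acc
      = acc ++ (l.filter (fun p => p.2)).map (·.1) := by
  induction l generalizing acc with
  | nil => simp
  | cons p l ih =>
    by_cases hp : p.2 = true <;> simp [hp, ih]

-- the two index loops, rewritten as folds over rank.zip attendance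
theorem foldA_zip {β : Type} (rank : List Int) (attendance : List Bool)
    (hle : rank.length ≤ attendance.length) (f : β → Int → β) (init : β) :
    (PySem.List.pyRange 0 (rank.length : Int) 1).foldl
      (fun acc i =>
        if PySem.List.pyGetD attendance i false = true then
          f acc (PySem.List.pyGetD rank i 0)
        else acc) init
      = (rank.zip attendance).foldl
          (fun acc p => if p.2 = true then f acc p.1 else acc) init := by
  have hzlen : (rank.zip attendance).length = rank.length := by
    simp [List.length_zip]; omega
  have hcast : (rank.length : Int) = ((rank.zip attendance).length : Int) := by
    rw [hzlen]
  rw [hcast]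
  rw [PySem.List.foldl_congr_mem
    (g := fun acc j =>
      (fun acc (p : Int × Bool) => if p.2 = true then f acc p.1 else acc) acc
        (PySem.List.pyGetD (rank.zip attendance) j (0, false)))]
  · exact PySem.List.foldl_pyRange_zero_pyGetD' (rank.zip attendance) (0, false)
      (fun acc p => if p.2 = true then f acc p.1 else acc) init
  · intro acc j hj
    rw [PySem.List.mem_pyRange_one] at hj
    obtain ⟨hj0, hjz⟩ := hj
    have hjr : j < (rank.length : Int) := by rw [hzlen] at hjz; exact hjz
    have hja : j < (attendance.length : Int) := by
      refine lt_of_lt_of_le hjr ?_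
      exact_mod_cast hle
    rw [PySem.List.pyGetD_eq_getElem attendance false hj0 hja,
        PySem.List.pyGetD_eq_getElem rank 0 hj0 hjr,
        PySem.List.pyGetD_eq_getElem (rank.zip attendance) (0, false) hj0 hjz]
    simp [List.getElem_zip]

-- ===== VERDICT (by name: the statement is the Claim_ definition above) =====
theorem solution_spec : Claim_equal_solution := by
  intro rank attendance _ hpre
  obtain ⟨hle, hcnt⟩ := hpre
  unfold Spec_solution
  simp only [solution, solution_alt]
  rw [foldA_zip rank attendance hle (fun acc r => acc ++ [r]),
      foldA_zip rank attendance hle (fun st r => step3 st r)]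
  rw [foldl_if_append]
  simp only [List.nil_append]
  have hstate :
      (rank.zip attendance).foldl
          (fun st p => if p.2 = true then step3 st p.1 else st)
          (none, none, none)
        = tri (PySem.List.sorted
            (((rank.zip attendance).filter (fun p => p.2)).map (·.1)) id false) := by
    have h0 : ((none, none, none) : Option Int × Option Int × Option Int) = tri [] := rfl
    rw [h0, foldl_step3_tri, zfold_ins, insort_eq_sorted]
  rw [hstate]
  set vals := ((rank.zip attendance).filter (fun p => p.2)).map (·.1) with hvals
  have hlen3 : 3 ≤ (PySem.List.sorted vals id false).length := by
    have : vals.length = (rank.zip attendance).countP (fun p => p.2) := by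
      rw [hvals]; simp [List.countP_eq_length_filter]
    rw [PySem.List.length_sorted]
    omega
  obtain ⟨a, b, c, t, hsl⟩ :
      ∃ a b c t, PySem.List.sorted vals id false = a :: b :: c :: t := by
    cases hs : PySem.List.sorted vals id false with
    | nil => rw [hs] at hlen3; simp at hlen3
    | cons a s1 =>
      cases s1 with
      | nil => rw [hs] at hlen3; simp at hlen3
      | cons b s2 =>
        cases s2 with
        | nil => rw [hs] at hlen3; simp at hlen3
        | cons c t => exact ⟨a, b, c, t, rfl⟩
  rw [hsl]
  have e0 : PySem.List.pyGetD (a :: b :: c :: t) 0 0 = a := by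
    simp [PySem.List.pyGetD_zero]
  have e1 : PySem.List.pyGetD (a :: b :: c :: t) 1 0 = b := by
    rw [PySem.List.pyGetD_ofNat' (a :: b :: c :: t) 1 0]; rfl
  have e2 : PySem.List.pyGetD (a :: b :: c :: t) 2 0 = c := by
    rw [PySem.List.pyGetD_ofNat' (a :: b :: c :: t) 2 0]; rfl
  rw [e0, e1, e2]
  simp [tri]
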